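-- pv_equiv track=rewrite | github.com/mstan/snesrecomp | tools/sneslib/commands/timeline.py | _extract_transitions
-- ===== SOURCE A (Python) =====
-- def _extract_transitions(frames, field):
--     """Extract (frame, value) pairs where field changes."""
--     transitions = []
--     sorted_keys = sorted(frames.keys())
--     prev = None
--     for f in sorted_keys:
--         val = frames[f].get(field, '?')
--         if val != prev:
--             transitions.append((f, val))
--             prev = val
--     return transitions
-- ===== SOURCE B (Python) =====
-- def _extract_transitions(frames, field):
--     """Extract (frame, value) pairs where field changes."""
--     keys = sorted(frames)
--     vals = [frames[f].get(field, '?') for f in keys]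
--     pairs = list(zip(keys, vals))
--     return pairs[:1] + [cur for cur, prv in zip(pairs[1:], pairs) if cur[1] != prv[1]]
-- ===== Notes on version B (the rewrite author's own statement) =====
-- stated objective: alternative
-- what changed: Replaces A's stateful prev-tracking loop with a stateless pipeline: precompute the value list once, then keep the first pair plus every pair whose value differs from its predecessor's, via zipping the pair list with its own tail.
import Mathlib
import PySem

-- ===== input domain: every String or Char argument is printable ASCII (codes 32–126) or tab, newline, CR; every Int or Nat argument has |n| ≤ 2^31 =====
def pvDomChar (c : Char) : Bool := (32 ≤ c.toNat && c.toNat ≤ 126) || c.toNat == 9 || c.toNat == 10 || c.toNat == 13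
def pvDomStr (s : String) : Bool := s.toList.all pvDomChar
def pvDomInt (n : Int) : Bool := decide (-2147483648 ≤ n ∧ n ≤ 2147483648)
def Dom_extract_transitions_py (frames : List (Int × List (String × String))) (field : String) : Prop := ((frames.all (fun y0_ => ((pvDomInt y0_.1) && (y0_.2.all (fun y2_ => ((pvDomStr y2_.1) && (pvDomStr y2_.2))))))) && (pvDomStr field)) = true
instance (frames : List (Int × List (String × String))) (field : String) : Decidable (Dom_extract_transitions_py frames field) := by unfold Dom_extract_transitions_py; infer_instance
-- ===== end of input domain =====

-- B replaces A's prev-accumulator loop with a stateless pipeline (value list, then a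
-- zip-with-tail filter); same cost, alternative decomposition.

-- shared helper: frames[f].get(field, '?') (f is always a key when used; default [] is never hit)
def pvFieldAt (frames : List (Int × List (String × String))) (field : String) (f : Int) : String :=
  PySem.Dict.getD (PySem.Dict.ofList ((PySem.Dict.ofList frames).getD f [])) field "?"

-- ===== PORT A =====
def extract_transitions_py (frames : List (Int × List (String × String))) (field : String) : List (Int × String) :=
  let sorted_keys := PySem.List.sorted (PySem.Dict.keys (PySem.Dict.ofList frames)) (fun x => x) false
  (sorted_keys.foldl
    (fun (st : List (Int × String) × Option String) f =>
      let val := pvFieldAt frames field f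
      if some val ≠ st.2 then (st.1 ++ [(f, val)], some val) else st)
    (([] : List (Int × String)), (none : Option String))).1

-- ===== PORT B =====
def extract_transitions_py_alt (frames : List (Int × List (String × String))) (field : String) : List (Int × String) :=
  let keys := PySem.List.sorted (PySem.Dict.keys (PySem.Dict.ofList frames)) (fun x => x) false
  let vals := keys.map (pvFieldAt frames field)
  let pairs := keys.zip vals
  PySem.List.slice pairs none (some 1) ++
    (((PySem.List.slice pairs (some 1) none).zip pairs).filter (fun x => x.1.2 != x.2.2)).map (·.1)

-- ===== PRECONDITION & SPEC =====
def Spec_extract_transitions_py (frames : List (Int × List (String × String))) (field : String) (out : List (Int × String)) : Prop := out = extract_transitions_py_alt frames field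
instance (frames : List (Int × List (String × String))) (field : String) (out : List (Int × String)) : Decidable (Spec_extract_transitions_py frames field out) := by unfold Spec_extract_transitions_py; infer_instance

-- ===== CLAIM (what is proved, stated in full; the proofs are below) =====
def Claim_equal_extract_transitions_py : Prop := ∀ (frames : List (Int × List (String × String))) (field : String), Dom_extract_transitions_py frames field → Spec_extract_transitions_py frames field (extract_transitions_py frames field)

-- ===== LEMMAS AND PROOFS =====

-- A's loop, as structural recursion on the remaining keys with the prev state explicit
def pvLoopA (g : Int → String) : List Int → Option String → List (Int × String)
  | [], _ => []
  | f :: ks, prev =>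
      if some (g f) ≠ prev then (f, g f) :: pvLoopA g ks (some (g f)) else pvLoopA g ks prev

theorem pvFoldl_eq_loopA (g : Int → String) (ks : List Int) :
    ∀ (acc : List (Int × String)) (prev : Option String),
      (ks.foldl
        (fun (st : List (Int × String) × Option String) f =>
          if some (g f) ≠ st.2 then (st.1 ++ [(f, g f)], some (g f)) else st)
        (acc, prev)).1 = acc ++ pvLoopA g ks prev := by
  induction ks with
  | nil => intro acc prev; simp [pvLoopA]
  | cons f ks ih =>
      intro acc prev
      simp only [List.foldl_cons]
      split_ifs with h
      · rw [ih]; simp [pvLoopA, h]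
      · rw [ih]; simp [pvLoopA, h]

theorem pvZip_self_map (g : Int → String) (ks : List Int) :
    ks.zip (ks.map g) = ks.map (fun f => (f, g f)) := by
  induction ks with
  | nil => rfl
  | cons f ks ih => simp [ih]

theorem pvLoopA_some (g : Int → String) (ks : List Int) :
    ∀ (p : String) (q : Int),
      pvLoopA g ks (some p) =
        (((ks.map (fun f => (f, g f))).zip ((q, p) :: ks.map (fun f => (f, g f)))).filter
            (fun x => x.1.2 != x.2.2)).map (·.1) := by
  induction ks with
  | nil => intro p q; rfl
  | cons f ks ih =>
      intro p q
      by_cases h : g f = p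
      · simp [pvLoopA, h, ih p f]
      · simp [pvLoopA, h, ih (g f) f]

theorem extract_transitions_py_spec : Claim_equal_extract_transitions_py := by
  intro frames field _
  show extract_transitions_py frames field = extract_transitions_py_alt frames field
  unfold extract_transitions_py extract_transitions_py_alt
  set g := pvFieldAt frames field with hg
  set ks := PySem.List.sorted (PySem.Dict.keys (PySem.Dict.ofList frames)) (fun x => x) false with hks
  simp only [pvFoldl_eq_loopA g ks [] none, List.nil_append, pvZip_self_map]
  cases ks with
  | nil => simp [pvLoopA, PySem.List.slice]
  | cons f rest =>
      have h1 : PySem.List.slice ((f :: rest).map (fun f => (f, g f))) none (some 1)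
          = [(f, g f)] := by
        rw [show ((1 : Int)) = ((1 : Nat) : Int) by norm_num, PySem.List.slice_to_natCast]
        simp
      have h2 : PySem.List.slice ((f :: rest).map (fun f => (f, g f))) (some 1) none
          = rest.map (fun f => (f, g f)) := by
        rw [show ((1 : Int)) = ((1 : Nat) : Int) by norm_num, PySem.List.slice_from_natCast]
        simp
      rw [h1, h2]
      have : pvLoopA g (f :: rest) none = (f, g f) :: pvLoopA g rest (some (g f)) := by
        simp [pvLoopA]
      rw [this, pvLoopA_some g rest (g f) f]
      simp
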